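-- pv_equiv track=rewrite | github.com/aszokalski/Logia | Etap 2/Logia08/Zad3.py | maxx
-- ===== SOURCE A (Python) =====
-- def maxx(slowo):
--     ret = ""
--     alfabet="aąbcćdeęfghijklłmnńoóprstuwxyz"
--     for litera in alfabet:
--         if litera in slowo:
--             lslowo = ""
--             start = False
--             for i in range(len(slowo)):
--                 if not start and slowo[i] == litera:
--                     start = True
--                 if litera not in slowo[i:]:
--                     start = False
--                 if start:
--                     lslowo += slowo[i]
--             if len(lslowo) > len(ret):
--                 ret = lslowo
--     return ret
-- ===== SOURCE B (Python) =====
-- def maxx(slowo):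
--     alfabet = "aąbcćdeęfghijklłmnńoóprstuwxyz"
--     pos = {}
--     for i, ch in enumerate(slowo):
--         if ch in pos:
--             pos[ch] = (pos[ch][0], i)
--         else:
--             pos[ch] = (i, i)
--     best = ""
--     for litera in alfabet:
--         if litera in pos:
--             f, l = pos[litera]
--             cand = slowo[f:l + 1]
--             if len(cand) > len(best):
--                 best = cand
--     return best
-- ===== Notes on version B (the rewrite author's own statement) =====
-- stated objective: faster
-- what changed: A rescans the word for every alphabet letter with an inner loop that does a substring test at each position; B makes one pass building a dict of each character's (first,last) occurrence indices and then slices the word once per letter present.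
import Mathlib
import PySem

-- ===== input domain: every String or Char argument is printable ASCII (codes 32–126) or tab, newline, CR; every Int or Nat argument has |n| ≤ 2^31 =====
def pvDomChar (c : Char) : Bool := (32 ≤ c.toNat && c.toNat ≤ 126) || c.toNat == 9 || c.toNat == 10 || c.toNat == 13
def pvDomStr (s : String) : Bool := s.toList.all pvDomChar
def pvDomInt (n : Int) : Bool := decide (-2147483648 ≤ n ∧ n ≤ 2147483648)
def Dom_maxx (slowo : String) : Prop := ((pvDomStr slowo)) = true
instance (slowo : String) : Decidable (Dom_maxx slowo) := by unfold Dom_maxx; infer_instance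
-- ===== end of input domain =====

-- B replaces A's per-letter rescans of the word (inner loop with a substring test per position)
-- by one pass building a first/last-occurrence table, then slices the word per alphabet letter; objective: faster.

-- ===== PORT A =====
-- inner loop body of A: for i in range(len(slowo)): … (st = (lslowo, start))
def maxxInnerStep (l : List Char) (litera : Char) (st : List Char × Bool) (i : Int) : List Char × Bool :=
  let start := if !st.2 && (PySem.List.pyGetD l i litera == litera) then true else st.2
  let start := if !(PySem.Chars.isIn [litera] (PySem.List.slice l (some i) none)) then false else start
  ((if start then st.1 ++ [PySem.List.pyGetD l i litera] else st.1), start)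
  -- slowo[i]: i is always in range here, so pyGetD (default never read) is exact

def maxxLetter (l : List Char) (ret : List Char) (litera : Char) : List Char :=
  if PySem.Chars.isIn [litera] l then
    let res := (PySem.List.pyRange 0 (l.length : Int) 1).foldl (maxxInnerStep l litera) ([], false)
    if res.1.length > ret.length then res.1 else ret
  else ret

def maxx (slowo : String) : String :=
  String.ofList (("aąbcćdeęfghijklłmnńoóprstuwxyz".toList).foldl (maxxLetter slowo.toList) [])

-- ===== PORT B =====
-- one pass: dict char -> (first index, last index)
def maxxAltPos (l : List Char) : PySem.Dict Char (Int × Int) :=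
  (PySem.List.enumerate l 0).foldl
    (fun d p =>
      match d.get? p.2 with
      | some fl => d.insert p.2 (fl.1, p.1)
      | none    => d.insert p.2 (p.1, p.1))
    PySem.Dict.empty

def maxxAltBest (l : List Char) (pos : PySem.Dict Char (Int × Int)) (best : List Char) (litera : Char) : List Char :=
  match pos.get? litera with
  | some fl =>
      let cand := PySem.List.slice l (some fl.1) (some (fl.2 + 1))
      if cand.length > best.length then cand else best
  | none => best

def maxx_alt (slowo : String) : String :=
  let pos := maxxAltPos slowo.toList
  String.ofList (("aąbcćdeęfghijklłmnńoóprstuwxyz".toList).foldl (maxxAltBest slowo.toList pos) [])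

-- ===== PRECONDITION & SPEC =====
def Spec_maxx (slowo : String) (out : String) : Prop := out = maxx_alt slowo
instance (slowo : String) (out : String) : Decidable (Spec_maxx slowo out) := by unfold Spec_maxx; infer_instance

-- ===== CLAIM (what is proved, stated in full; the proofs are below) =====
def Claim_equal_maxx : Prop := ∀ (slowo : String), Dom_maxx slowo → Spec_maxx slowo (maxx slowo)

-- ===== LEMMAS AND PROOFS =====

-- index of the LAST occurrence of c in l (meaningful when c ∈ l)
def lastIdx (l : List Char) (c : Char) : Nat := l.length - 1 - l.reverse.idxOf c

-- 'litera in slowo' for a one-char needle is list membership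
theorem isIn_singleton (c : Char) (s : List Char) :
    PySem.Chars.isIn [c] s = decide (c ∈ s) := by
  rcases h : decide (c ∈ s) with _ | _
  · simp only [decide_eq_false_iff_not] at h
    simpa [PySem.Chars.isIn_eq_false_iff, List.singleton_infix_iff] using h
  · simp only [decide_eq_true_eq] at h
    simpa [PySem.Chars.isIn_iff_infix, List.singleton_infix_iff] using h

theorem mem_drop_iff_le_lastIdx {c : Char} {l : List Char} (h : c ∈ l) (k : Nat) :
    c ∈ l.drop k ↔ k ≤ lastIdx l c := by
  have hr : c ∈ l.reverse := by simpa using h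
  have hrlt : l.reverse.idxOf c < l.length := by
    simpa using List.idxOf_lt_length_of_mem hr
  constructor
  · intro hd
    have : c ∈ (l.drop k).reverse := by simpa using hd
    rw [List.reverse_drop] at this
    have := (List.mem_take_iff_idxOf_lt hr).1 this
    unfold lastIdx; omega
  · intro hle
    have : l.reverse.idxOf c < l.length - k := by unfold lastIdx at hle; omega
    have : c ∈ (l.reverse.take (l.length - k)) := (List.mem_take_iff_idxOf_lt hr).2 this
    rw [← List.reverse_drop] at this
    simpa using this

theorem firstIdx_le_lastIdx {c : Char} {l : List Char} (h : c ∈ l) :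
    l.idxOf c ≤ lastIdx l c := by
  have hf : l.idxOf c < l.length := List.idxOf_lt_length_of_mem h
  have : c ∈ l.drop (l.idxOf c) := by
    have : l.drop (l.idxOf c) = c :: l.drop (l.idxOf c + 1) := by
      rw [List.drop_eq_getElem_cons hf]
      simp [List.getElem_idxOf]
    rw [this]; exact List.mem_cons_self
  exact (mem_drop_iff_le_lastIdx h _).1 this

theorem lastIdx_lt_length {c : Char} {l : List Char} (h : c ∈ l) :
    lastIdx l c < l.length := by
  have : 0 < l.length := List.length_pos_of_mem h
  unfold lastIdx; omega

-- the Boolean 'start' of A's inner loop after k iterations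
def Sb (l : List Char) (c : Char) (k : Nat) : Bool :=
  decide (c ∈ l.take k) && decide (c ∈ l.drop (k - 1))

-- the collected characters of A's inner loop after k iterations
def accA (l : List Char) (c : Char) (k : Nat) : List Char :=
  ((List.range k).filter (fun i => Sb l c (i + 1))).map (fun i => l.getD i c)

theorem mem_drop_pred {c : Char} {l : List Char} {k : Nat} (h : c ∈ l.drop k) :
    c ∈ l.drop (k - 1) := by
  have hd : l.drop k = List.drop (k - (k - 1)) (l.drop (k - 1)) := by
    rw [List.drop_drop]; congr 1; omega
  rw [hd] at h
  exact List.mem_of_mem_drop h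

set_option maxRecDepth 4096 in
theorem inner_invariant (l : List Char) (c : Char) (k : Nat) :
    ((List.range k).map (fun i : Nat => (i : Int))).foldl (maxxInnerStep l c) ([], false)
      = (accA l c k, Sb l c k) := by
  induction k with
  | zero => simp [accA, Sb]
  | succ k ih =>
    rw [List.range_succ, List.map_append, List.foldl_append, ih]
    simp only [List.map_cons, List.map_nil, List.foldl_cons, List.foldl_nil]
    unfold maxxInnerStep
    rw [PySem.List.pyGetD_natCast, PySem.List.slice_from_natCast, isIn_singleton]
    have hacc : accA l c (k + 1) = accA l c k ++ (if Sb l c (k + 1) then [l.getD k c] else []) := by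
      unfold accA
      rw [List.range_succ, List.filter_append, List.map_append]
      by_cases h : Sb l c (k + 1) <;> simp [h]
    have hSb : Sb l c (k + 1)
        = (if !(decide (c ∈ l.drop k)) then false
           else (if !Sb l c k && (l.getD k c == c) then true else Sb l c k)) := by
      by_cases hd : c ∈ l.drop k
      · have hk : k < l.length := by
          by_contra hk
          rw [List.drop_eq_nil_of_le (by omega)] at hd
          simp at hd
        have hd1 : c ∈ l.drop (k - 1) := mem_drop_pred hd
        have hSbk : Sb l c k = decide (c ∈ l.take k) := by unfold Sb; simp [hd1]
        have hget : l.getD k c = l[k] := List.getD_eq_getElem l c hk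
        have htk : l.take (k + 1) = l.take k ++ [l[k]] := by
          rw [List.take_add_one]; simp [List.getElem?_eq_getElem hk]
        unfold Sb
        simp only [Nat.add_sub_cancel, hd, decide_true, Bool.and_true, Bool.not_true,
          Bool.false_eq_true, if_false, hget, htk, List.mem_append, List.mem_singleton]
        by_cases h1 : c ∈ l.take k <;> by_cases h2 : l[k] = c <;>
          simp [h1, h2, hd1, show (c = l[k]) ↔ (l[k] = c) from eq_comm]
      · unfold Sb
        simp [hd]
    rw [hacc, hSb]
    by_cases hd : c ∈ l.drop k <;>
      simp only [hd, decide_true, decide_false, Bool.not_true, Bool.not_false,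
        Bool.false_eq_true, if_true, if_false] <;>
      first
      | (split_ifs <;> simp_all)
      | simp

theorem Sb_succ_eq {c : Char} {l : List Char} (h : c ∈ l) (k : Nat) :
    Sb l c (k + 1) = (decide (l.idxOf c ≤ k) && decide (k ≤ lastIdx l c)) := by
  unfold Sb
  have h1 : c ∈ l.take (k + 1) ↔ l.idxOf c ≤ k := by
    rw [List.mem_take_iff_idxOf_lt h]; omega
  have h2 := mem_drop_iff_le_lastIdx h k
  simp only [Nat.add_sub_cancel]
  rw [show decide (c ∈ List.take (k+1) l) = decide (List.idxOf c l ≤ k) by simp [h1],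
      show decide (c ∈ List.drop k l) = decide (k ≤ lastIdx l c) by simp [h2]]

theorem filter_range_band (f t k : Nat) (h : f ≤ t) :
    (List.range k).filter (fun i => decide (f ≤ i) && decide (i ≤ t))
      = List.range' f (min k (t + 1) - f) 1 := by
  induction k with
  | zero => simp
  | succ k ih =>
    rw [List.range_succ, List.filter_append, ih]
    by_cases h1 : f ≤ k ∧ k ≤ t
    · have hmin : min (k + 1) (t + 1) - f = (min k (t + 1) - f) + 1 := by omega
      have hk : f + 1 * (min k (t + 1) - f) = k := by omega
      rw [hmin, List.range'_concat, hk]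
      simp [h1.1, h1.2]
    · have hmin : min (k + 1) (t + 1) - f = min k (t + 1) - f := by omega
      rw [hmin]
      have : ¬ (f ≤ k ∧ k ≤ t) := h1
      simp only [List.filter_cons, List.filter_nil]
      by_cases hf : f ≤ k
      · simp [hf, show ¬ k ≤ t by omega]
      · simp [hf]

theorem map_getD_range' (l : List Char) (c : Char) (f m : Nat) (h : f + m ≤ l.length) :
    (List.range' f m 1).map (fun i => l.getD i c) = (l.drop f).take m := by
  apply List.ext_getElem
  · simp; omega
  · intro i h1 h2
    simp only [List.getElem_map, List.getElem_range', List.getElem_take, List.getElem_drop]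
    have hi : i < m := by simpa using h1
    rw [List.getD_eq_getElem l c (by omega)]
    congr 1; omega

theorem Acc_eq_slice {c : Char} {l : List Char} (h : c ∈ l) :
    accA l c l.length = (l.drop (l.idxOf c)).take (lastIdx l c + 1 - l.idxOf c) := by
  have hft := firstIdx_le_lastIdx h
  have htl := lastIdx_lt_length h
  unfold accA
  have : (List.range l.length).filter (fun i => Sb l c (i + 1))
      = (List.range l.length).filter (fun i => decide (l.idxOf c ≤ i) && decide (i ≤ lastIdx l c)) := by
    apply List.filter_congr
    intro i _
    exact Sb_succ_eq h i
  rw [this, filter_range_band _ _ _ hft]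
  have hmin : min l.length (lastIdx l c + 1) = lastIdx l c + 1 := by omega
  rw [hmin]
  exact map_getD_range' l c _ _ (by omega)

theorem pos_get? (l : List Char) (c : Char) :
    (maxxAltPos l).get? c
      = if c ∈ l then some ((l.idxOf c : Int), (lastIdx l c : Int)) else none := by
  induction l using List.reverseRecOn generalizing c with
  | nil => simp [maxxAltPos, PySem.List.enumerate, PySem.Dict.get?_empty]
  | append_singleton m x ih =>
    unfold maxxAltPos at ih ⊢
    rw [PySem.List.enumerate_append, List.foldl_append]
    simp only [PySem.List.enumerate_cons, PySem.List.enumerate_nil, List.foldl_cons,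
      List.foldl_nil, zero_add]
    rw [ih x]
    have hrev : (m ++ [x]).reverse = x :: m.reverse := by simp
    by_cases hcx : c = x
    · subst hcx
      have hlast : lastIdx (m ++ [c]) c = m.length := by
        unfold lastIdx
        rw [hrev, List.idxOf_cons_self]
        simp
      by_cases hcm : c ∈ m
      · simp only [hcm, if_true]
        rw [PySem.Dict.get?_insert_self]
        have hidx : List.idxOf c (m ++ [c]) = List.idxOf c m := by
          rw [List.idxOf_append]; simp [hcm]
        simp [hidx, hlast, hcm]
      · simp only [hcm, if_false]
        rw [PySem.Dict.get?_insert_self]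
        have hidx : List.idxOf c (m ++ [c]) = m.length := by
          rw [List.idxOf_append]; simp [hcm, List.idxOf_cons_self]
        simp [hidx, hlast]
    · have hne : c ≠ x := hcx
      have hmem : c ∈ m ++ [x] ↔ c ∈ m := by simp [hne]
      have hidx : c ∈ m → List.idxOf c (m ++ [x]) = List.idxOf c m := by
        intro h; rw [List.idxOf_append]; simp [h]
      have hlast : c ∈ m → lastIdx (m ++ [x]) c = lastIdx m c := by
        intro h
        have hr : c ∈ m.reverse := by simpa using h
        have hrlt : m.reverse.idxOf c < m.length := by
          simpa using List.idxOf_lt_length_of_mem hr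
        unfold lastIdx
        rw [hrev, List.idxOf_cons]
        have : (x == c) = false := by simp [hne.symm]
        rw [this]
        simp only [cond_false, List.length_append]
        simp
        omega
      rcases h : (if x ∈ m then some ((List.idxOf x m : Int), (lastIdx m x : Int)) else none) with _ | fl <;>
        · rw [PySem.Dict.get?_insert_of_ne _ _ hne, ih c]
          by_cases hcm : c ∈ m
          · simp [hmem, hcm, hidx hcm, hlast hcm]
          · simp [hmem, hcm]

theorem letter_step (l : List Char) (ret : List Char) (c : Char) :
    maxxLetter l ret c = maxxAltBest l (maxxAltPos l) ret c := by
  unfold maxxLetter maxxAltBest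
  rw [isIn_singleton, pos_get? l c]
  by_cases hc : c ∈ l
  · simp only [hc, decide_true, if_true]
    have hr : ((l.length : Int)) = ((l.length : Nat) : Int) := rfl
    rw [hr, PySem.List.pyRange_zero_natCast, inner_invariant, Acc_eq_slice hc]
    have hcast : ((lastIdx l c : Nat) : Int) + 1 = (((lastIdx l c + 1 : Nat)) : Int) := by push_cast; ring
    rw [hcast, PySem.List.slice_natCast]
  · simp [hc]

-- ===== VERDICT (by name: the statement is the Claim_ definition above) =====
theorem maxx_spec : Claim_equal_maxx := by
  intro slowo _
  unfold Spec_maxx maxx maxx_alt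
  have : maxxLetter slowo.toList = maxxAltBest slowo.toList (maxxAltPos slowo.toList) := by
    funext ret c; exact letter_step _ _ _
  rw [this]
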